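-- pv_equiv track=rewrite | github.com/Biomolecular-Design-Nexus/nupack_mcp | scripts/complex_equilibrium.py | _simple_hairpin_structure
-- ===== SOURCE A (Python) =====
-- def _simple_hairpin_structure(sequence: str) -> str:
--     """Generate simple hairpin structure"""
--     n = len(sequence)
--     structure = ['.'] * n
--
--     # Create simple hairpin in the middle
--     if n >= 8:
--         start = n // 4
--         end = 3 * n // 4
--         stem_length = min(3, (end - start) // 2)
--
--         for i in range(stem_length):
--             structure[start + i] = '('
--             structure[end - i - 1] = ')'
--
--     return ''.join(structure)
-- ===== SOURCE B (Python) =====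
-- def _simple_hairpin_structure(sequence: str) -> str:
--     """Build the stem by recursive nesting: a stem of depth k is '(' + <depth k-1> + ')'.
--     The brackets come from the recursion structure, not from index placement."""
--     def wrap(k: int, loop: int) -> str:
--         if k == 0:
--             return '.' * loop
--         return '(' + wrap(k - 1, loop) + ')'
--
--     n = len(sequence)
--     if n < 8:
--         return '.' * n
--     start = n // 4
--     end = 3 * n // 4
--     stem = min(3, (end - start) // 2)
--     return '.' * start + wrap(stem, end - start - 2 * stem) + '.' * (n - end)
-- ===== Notes on version B (the rewrite author's own statement) =====
-- stated objective: alternative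
-- what changed: Replaces the dot-filled list with an index-writing loop by a recursive nesting construction in which each recursion level wraps the inner region in one matched bracket pair, so the stem arises from the recursion depth instead of paired index assignments.
import Mathlib
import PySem

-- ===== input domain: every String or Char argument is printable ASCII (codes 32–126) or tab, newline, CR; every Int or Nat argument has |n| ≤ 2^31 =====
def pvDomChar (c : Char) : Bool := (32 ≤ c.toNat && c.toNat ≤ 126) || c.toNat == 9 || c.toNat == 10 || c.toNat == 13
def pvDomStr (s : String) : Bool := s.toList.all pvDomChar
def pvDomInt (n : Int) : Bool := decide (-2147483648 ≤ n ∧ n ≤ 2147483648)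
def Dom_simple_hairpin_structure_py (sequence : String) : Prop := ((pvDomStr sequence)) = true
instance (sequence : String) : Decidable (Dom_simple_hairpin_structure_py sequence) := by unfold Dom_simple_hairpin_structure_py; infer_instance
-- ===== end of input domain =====

-- B builds the stem by a recursive nesting construction wrap(k) = '(' ++ wrap(k-1) ++ ')'
-- instead of A's dot-filled list with an index-writing loop (alternative decomposition).

-- ===== PORT A =====
-- literal port: list of n dots, then for i in range(stem_length) set positions
-- start+i to '(' and end-i-1 to ')' (indices are provably in range, so Nat List.set is exact)
def simple_hairpin_structure_py (sequence : String) : String :=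
  let n := sequence.toList.length
  let st0 := List.replicate n '.'
  let st1 :=
    if n ≥ 8 then
      let start := n / 4
      let e := 3 * n / 4
      let stem_length := min 3 ((e - start) / 2)
      (List.range stem_length).foldl
        (fun st i => (st.set (start + i) '(').set (e - i - 1) ')') st0
    else st0
  String.mk st1

-- ===== PORT B =====
-- recursive nesting: wrap k m = '(' :: wrap (k-1) m ++ [')']
def hairpinWrap : Nat → Nat → List Char
  | 0, m => List.replicate m '.'
  | k + 1, m => '(' :: hairpinWrap k m ++ [')']

def simple_hairpin_structure_py_alt (sequence : String) : String :=
  let n := sequence.toList.length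
  if n < 8 then String.mk (List.replicate n '.')
  else
    let start := n / 4
    let e := 3 * n / 4
    let stem := min 3 ((e - start) / 2)
    String.mk (List.replicate start '.' ++ hairpinWrap stem (e - start - 2 * stem) ++
      List.replicate (n - e) '.')

-- ===== PRECONDITION & SPEC =====
def Spec_simple_hairpin_structure_py (sequence : String) (out : String) : Prop := out = simple_hairpin_structure_py_alt sequence
instance (sequence : String) (out : String) : Decidable (Spec_simple_hairpin_structure_py sequence out) := by unfold Spec_simple_hairpin_structure_py; infer_instance

-- ===== CLAIM (what is proved, stated in full; the proofs are below) =====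
def Claim_equal_simple_hairpin_structure_py : Prop := ∀ (sequence : String), Dom_simple_hairpin_structure_py sequence → Spec_simple_hairpin_structure_py sequence (simple_hairpin_structure_py sequence)

-- ===== LEMMAS AND PROOFS =====

-- the nesting recursion unfolds to three flat runs
theorem hairpinWrap_eq (k m : ℕ) :
    hairpinWrap k m =
      List.replicate k '(' ++ List.replicate m '.' ++ List.replicate k ')' := by
  induction k with
  | zero => simp [hairpinWrap]
  | succ k ih =>
      rw [hairpinWrap, ih]
      simp [List.replicate_succ]
      rw [← List.replicate_succ', List.replicate_succ]

-- core list-level fact, purely in terms of n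
theorem hairpin_lists_eq (n : ℕ) (h : 8 ≤ n) :
    (List.range (min 3 ((3 * n / 4 - n / 4) / 2))).foldl
      (fun st i => (st.set (n / 4 + i) '(').set (3 * n / 4 - i - 1) ')')
      (List.replicate n '.') =
    List.replicate (n / 4) '.' ++
      (List.replicate (min 3 ((3 * n / 4 - n / 4) / 2)) '(' ++
       List.replicate (3 * n / 4 - n / 4 - 2 * min 3 ((3 * n / 4 - n / 4) / 2)) '.' ++
       List.replicate (min 3 ((3 * n / 4 - n / 4) / 2)) ')') ++
      List.replicate (n - 3 * n / 4) '.' := by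
  set s := n / 4 with hs
  set e := 3 * n / 4 with he
  have hstem : min 3 ((e - s) / 2) = 2 ∨ min 3 ((e - s) / 2) = 3 := by omega
  have hr2 : List.range 2 = [0, 1] := by decide
  have hr3 : List.range 3 = [0, 1, 2] := by decide
  rcases hstem with hst | hst <;>
    rw [hst] <;>
    simp only [hr2, hr3, List.foldl_cons, List.foldl_nil] <;>
    apply List.ext_getElem (by simp; omega) <;>
    intro i h1 h2 <;>
    simp only [List.getElem_set, List.getElem_replicate, List.getElem_append,
      List.length_replicate, List.length_append] <;>
    split_ifs <;> first | rfl | omega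

-- ===== VERDICT (by name: the statement is the Claim_ definition above) =====
theorem simple_hairpin_structure_py_spec : Claim_equal_simple_hairpin_structure_py := by
  intro sequence _
  unfold Spec_simple_hairpin_structure_py simple_hairpin_structure_py simple_hairpin_structure_py_alt
  dsimp only
  split_ifs with h1 h2 h3
  · omega
  · rw [hairpinWrap_eq]
    exact congrArg String.mk (hairpin_lists_eq _ h1)
  · rfl
  · omega
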